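-- pv_equiv track=rewrite | github.com/psu6510110340/Project_CAN_waveform | decoder.py | remove_stuff_bits
-- ===== SOURCE A (Python) =====
-- def remove_stuff_bits(bitstream):
--     un_stf_bits = [bitstream[0]]
--     stf_bit_pos = []
--
--     last_bit = bitstream[0]
--     cnt = 1
--     bit_cnt = 0
--
--     for bit in bitstream[1:]:
--         bit_cnt += 1
--         if bit == last_bit:
--             cnt += 1
--             un_stf_bits.append(bit)
--         else:
--             if cnt == 5:
--                 cnt = 1
--                 # add stuff bit position to list
--                 stf_bit_pos.append(bit_cnt)
--             else:
--                 cnt = 1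
--                 un_stf_bits.append(bit)
--
--         last_bit = bit
--
--     return un_stf_bits, stf_bit_pos
-- ===== SOURCE B (Python) =====
-- from itertools import groupby
--
-- def remove_stuff_bits(bitstream):
--     runs = [(k, len(list(g))) for k, g in groupby(bitstream)]
--     k0, L0 = runs[0]
--     out = [k0] * L0
--     pos = []
--     idx = L0
--     prev_len = L0
--     for k, L in runs[1:]:
--         if prev_len == 5:
--             pos.append(idx)
--             out += [k] * (L - 1)
--         else:
--             out += [k] * L
--         idx += L
--         prev_len = L
--     return out, pos
-- ===== Notes on version B (the rewrite author's own statement) =====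
-- stated objective: alternative
-- what changed: Replaces A's bit-at-a-time scan with mutable last/cnt/bit_cnt state by an itertools.groupby pass over maximal runs of equal bits: emit the first run whole, drop the head of any run following a length-5 run while recording its start index.
import Mathlib
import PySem

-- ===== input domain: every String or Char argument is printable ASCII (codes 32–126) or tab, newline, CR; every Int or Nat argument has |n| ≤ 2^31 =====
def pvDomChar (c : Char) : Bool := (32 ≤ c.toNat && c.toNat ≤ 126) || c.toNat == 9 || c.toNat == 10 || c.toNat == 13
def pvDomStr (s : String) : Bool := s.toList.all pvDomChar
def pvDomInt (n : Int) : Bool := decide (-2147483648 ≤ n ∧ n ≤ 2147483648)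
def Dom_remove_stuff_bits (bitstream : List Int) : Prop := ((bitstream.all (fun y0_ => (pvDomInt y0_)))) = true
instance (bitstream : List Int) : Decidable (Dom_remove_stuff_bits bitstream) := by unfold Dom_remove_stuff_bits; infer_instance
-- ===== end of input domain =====

-- B rewrites A's bit-at-a-time scan as a pass over maximal runs of equal bits (itertools.groupby):
-- same return value, different decomposition ("alternative" objective, no speed claim).

-- ===== PORT A =====
-- loop body of A's for-loop; state = (un_stf_bits, stf_bit_pos, last_bit, cnt, bit_cnt)
def pvStepA (s : List Int × List Int × Int × Int × Int) (bit : Int) :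
    List Int × List Int × Int × Int × Int :=
  let (un, pos, last, cnt, bc) := s
  let bc := bc + 1
  if bit = last then (un ++ [bit], pos, bit, cnt + 1, bc)
  else if cnt = 5 then (un, pos ++ [bc], bit, 1, bc)
  else (un ++ [bit], pos, bit, 1, bc)

def remove_stuff_bits (bitstream : List Int) : List Int × List Int :=
  match bitstream with
  | [] => ([], [])   -- unreachable under Pre_: Python raises IndexError on []
  | b0 :: rest =>
    let st := rest.foldl pvStepA ([b0], [], b0, 1, 0)
    (st.1, st.2.1)

-- ===== PORT B =====
-- runs of equal elements, as (value, length) pairs (itertools.groupby)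
def runsOf : List Int → List (Int × Int)
  | [] => []
  | x :: xs =>
    (x, ((xs.takeWhile (fun y => y == x)).length : Int) + 1) ::
      runsOf (xs.dropWhile (fun y => y == x))
termination_by l => l.length
decreasing_by
  simpa using Nat.lt_succ_of_le (List.length_dropWhile_le _ _)

-- loop body of B's for-loop over the remaining runs; state = (out, pos, idx, prev_len)
def pvStepB (s : List Int × List Int × Int × Int) (r : Int × Int) :
    List Int × List Int × Int × Int :=
  let (out, pos, idx, prev) := s
  if prev = 5 then (out ++ List.replicate (r.2 - 1).toNat r.1, pos ++ [idx], idx + r.2, r.2)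
  else (out ++ List.replicate r.2.toNat r.1, pos, idx + r.2, r.2)

def remove_stuff_bits_alt (bitstream : List Int) : List Int × List Int :=
  match runsOf bitstream with
  | [] => ([], [])   -- unreachable under Pre_: runs[0] raises IndexError on []
  | (k0, L0) :: rest =>
    let st := rest.foldl pvStepB (List.replicate L0.toNat k0, [], L0, L0)
    (st.1, st.2.1)

-- ===== PRECONDITION & SPEC =====
-- Pre_ excludes only the empty list, on which Python A raises IndexError (bitstream[0]).
def Pre_remove_stuff_bits (bitstream : List Int) : Prop := bitstream ≠ []
instance (bitstream : List Int) : Decidable (Pre_remove_stuff_bits bitstream) := by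
  unfold Pre_remove_stuff_bits; infer_instance

def pvWitness_remove_stuff_bits : List Int := [0, 0, 0, 0, 0, 1, 1]

def Spec_remove_stuff_bits (bitstream : List Int) (out : List Int × List Int) : Prop :=
  out = remove_stuff_bits_alt bitstream
instance (bitstream : List Int) (out : List Int × List Int) :
    Decidable (Spec_remove_stuff_bits bitstream out) := by
  unfold Spec_remove_stuff_bits; infer_instance

-- ===== CLAIM (what is proved, stated in full; the proofs are below) =====
def Claim_equal_remove_stuff_bits : Prop :=
  ∀ (bitstream : List Int), Dom_remove_stuff_bits bitstream →
    Pre_remove_stuff_bits bitstream →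
    Spec_remove_stuff_bits bitstream (remove_stuff_bits bitstream)

-- ===== LEMMAS AND PROOFS =====

-- intermediate recursion: what A's loop does on the remaining bits, as structural recursion
def pvCore (last cnt bc : Int) : List Int → List Int × List Int
  | [] => ([], [])
  | b :: bs =>
    if b = last then
      let r := pvCore b (cnt + 1) (bc + 1) bs; (b :: r.1, r.2)
    else if cnt = 5 then
      let r := pvCore b 1 (bc + 1) bs; (r.1, (bc + 1) :: r.2)
    else
      let r := pvCore b 1 (bc + 1) bs; (b :: r.1, r.2)

theorem foldA_eq (bs : List Int) : ∀ (un pos : List Int) (last cnt bc : Int),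
    ((bs.foldl pvStepA (un, pos, last, cnt, bc)).1,
     (bs.foldl pvStepA (un, pos, last, cnt, bc)).2.1)
      = (un ++ (pvCore last cnt bc bs).1, pos ++ (pvCore last cnt bc bs).2) := by
  induction bs with
  | nil => intro un pos last cnt bc; simp [pvCore]
  | cons b bs ih =>
    intro un pos last cnt bc
    simp only [List.foldl_cons, pvStepA, pvCore]
    by_cases h1 : b = last
    · simp [h1, ih]
    · by_cases h2 : cnt = 5
      · simp [h1, h2, ih]
      · simp [h1, h2, ih]

theorem foldB_append (rs : List (Int × Int)) : ∀ (out pos : List Int) (idx prev : Int),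
    ((rs.foldl pvStepB (out, pos, idx, prev)).1,
     (rs.foldl pvStepB (out, pos, idx, prev)).2.1)
      = (out ++ (rs.foldl pvStepB ([], [], idx, prev)).1,
         pos ++ (rs.foldl pvStepB ([], [], idx, prev)).2.1) := by
  induction rs with
  | nil => intro out pos idx prev; simp
  | cons r rs ih =>
    intro out pos idx prev
    simp only [List.foldl_cons, pvStepB, List.nil_append]
    by_cases h : prev = 5
    · rw [if_pos h, if_pos h]
      have h1 := ih (out ++ List.replicate (r.2 - 1).toNat r.1) (pos ++ [idx]) (idx + r.2) r.2
      have h2 := ih (List.replicate (r.2 - 1).toNat r.1) [idx] (idx + r.2) r.2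
      simp only [Prod.mk.injEq] at h1 h2 ⊢
      exact ⟨by rw [h1.1, h2.1]; simp, by rw [h1.2, h2.2]; simp⟩
    · rw [if_neg h, if_neg h]
      have h1 := ih (out ++ List.replicate r.2.toNat r.1) pos (idx + r.2) r.2
      have h2 := ih (List.replicate r.2.toNat r.1) [] (idx + r.2) r.2
      simp only [Prod.mk.injEq] at h1 h2 ⊢
      exact ⟨by rw [h1.1, h2.1]; simp, by rw [h1.2, h2.2]; simp⟩

theorem takeWhile_eq_repl (x : Int) (xs : List Int) :
    xs.takeWhile (fun y => y == x)
      = List.replicate (xs.takeWhile (fun y => y == x)).length x := by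
  rw [List.eq_replicate_iff]
  refine ⟨rfl, ?_⟩
  intro b hb
  have := List.mem_takeWhile_imp hb
  simpa using this

theorem head?_dropWhile (p : Int → Bool) : ∀ (xs : List Int) (y : Int),
    (xs.dropWhile p).head? = some y → p y = false := by
  intro xs
  induction xs with
  | nil => intro y h; simp [List.dropWhile] at h
  | cons x xs ih =>
    intro y h
    cases hp : p x with
    | true => exact ih y (by simpa [List.dropWhile, hp] using h)
    | false =>
      have hxy : x = y := by simpa [List.dropWhile, hp] using h
      rw [← hxy]; exact hp

theorem core_replicate (b : Int) (ds : List Int) : ∀ (n : Nat) (c q : Int),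
    pvCore b c q (List.replicate n b ++ ds)
      = (List.replicate n b ++ (pvCore b (c + n) (q + n) ds).1,
         (pvCore b (c + n) (q + n) ds).2) := by
  intro n
  induction n with
  | zero => intro c q; simp
  | succ n ih =>
    intro c q
    have hrw : List.replicate (n + 1) b ++ ds = b :: (List.replicate n b ++ ds) := by
      simp [List.replicate_succ]
    rw [hrw]
    simp only [pvCore]
    rw [if_pos trivial, ih (c + 1) (q + 1)]
    have hc : c + 1 + (n : Int) = c + ((n : Nat) + 1 : Nat) := by push_cast; ring
    have hq : q + 1 + (n : Int) = q + ((n : Nat) + 1 : Nat) := by push_cast; ring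
    rw [hc, hq]
    simp [List.replicate_succ]

theorem core_runs (bs : List Int) : ∀ (last cnt bc : Int),
    (∀ y, bs.head? = some y → y ≠ last) →
    pvCore last cnt bc bs
      = (((runsOf bs).foldl pvStepB ([], [], bc + 1, cnt)).1,
         ((runsOf bs).foldl pvStepB ([], [], bc + 1, cnt)).2.1) := by
  induction bs using runsOf.induct with
  | case1 => intro last cnt bc _; simp [runsOf, pvCore]
  | case2 x xs ih =>
    intro last cnt bc hne
    have hxl : x ≠ last := hne x rfl
    set n := (xs.takeWhile (fun y => y == x)).length with hn
    set ds := xs.dropWhile (fun y => y == x) with hds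
    have hxs : xs = List.replicate n x ++ ds := by
      conv_lhs => rw [← List.takeWhile_append_dropWhile (p := fun y => y == x) (l := xs)]
      rw [hn, hds, ← takeWhile_eq_repl]
    have hdhead : ∀ y, ds.head? = some y → y ≠ x := by
      intro y hy
      have := head?_dropWhile (fun y => y == x) xs y (by rw [← hds]; exact hy)
      simpa using this
    have hruns : runsOf (x :: xs) = (x, (n : Int) + 1) :: runsOf ds := by
      rw [runsOf]
    have hcore : pvCore x 1 (bc + 1) xs
        = (List.replicate n x ++ (pvCore x (1 + (n : Int)) (bc + 1 + (n : Int)) ds).1,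
           (pvCore x (1 + (n : Int)) (bc + 1 + (n : Int)) ds).2) := by
      conv_lhs => rw [hxs]
      exact core_replicate x ds n 1 (bc + 1)
    have hrec := ih x (1 + (n : Int)) (bc + 1 + (n : Int)) hdhead
    rw [hruns, List.foldl_cons]
    simp only [pvStepB, List.nil_append]
    by_cases h5 : cnt = 5
    · rw [if_pos h5]
      have hrepl : ((n : Int) + 1 - 1).toNat = n := by simp
      have hseed : bc + 1 + ((n : Int) + 1) = bc + 1 + (n : Int) + 1 := by ring
      have hprev : (n : Int) + 1 = 1 + (n : Int) := by ring
      rw [hrepl, hseed, hprev]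
      have hL : pvCore last cnt bc (x :: xs)
          = ((pvCore x 1 (bc + 1) xs).1, (bc + 1) :: (pvCore x 1 (bc + 1) xs).2) := by
        simp only [pvCore]
        rw [if_neg hxl, if_pos h5]
      have hfb := foldB_append (runsOf ds) (List.replicate n x) [bc + 1]
        (bc + 1 + (n : Int) + 1) (1 + (n : Int))
      simp only [Prod.mk.injEq] at hfb
      rw [hL, hcore, hrec, hfb.1, hfb.2]
      simp
    · rw [if_neg h5]
      have hrepl : ((n : Int) + 1).toNat = n + 1 := by simp
      have hseed : bc + 1 + ((n : Int) + 1) = bc + 1 + (n : Int) + 1 := by ring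
      have hprev : (n : Int) + 1 = 1 + (n : Int) := by ring
      rw [hrepl, hseed, hprev]
      have hL : pvCore last cnt bc (x :: xs)
          = (x :: (pvCore x 1 (bc + 1) xs).1, (pvCore x 1 (bc + 1) xs).2) := by
        simp only [pvCore]
        rw [if_neg hxl, if_neg h5]
      have hfb := foldB_append (runsOf ds) (List.replicate (n + 1) x) []
        (bc + 1 + (n : Int) + 1) (1 + (n : Int))
      simp only [Prod.mk.injEq] at hfb
      rw [hL, hcore, hrec, hfb.1, hfb.2]
      simp [List.replicate_succ]

-- ===== VERDICT (by name: the statement is the Claim_ definition above) =====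
theorem remove_stuff_bits_spec : Claim_equal_remove_stuff_bits := by
  intro bitstream _ hpre
  unfold Spec_remove_stuff_bits
  cases bitstream with
  | nil => exact absurd rfl hpre
  | cons x xs =>
    set n := (xs.takeWhile (fun y => y == x)).length with hn
    set ds := xs.dropWhile (fun y => y == x) with hds
    have hxs : xs = List.replicate n x ++ ds := by
      conv_lhs => rw [← List.takeWhile_append_dropWhile (p := fun y => y == x) (l := xs)]
      rw [hn, hds, ← takeWhile_eq_repl]
    have hdhead : ∀ y, ds.head? = some y → y ≠ x := by
      intro y hy
      have := head?_dropWhile (fun y => y == x) xs y (by rw [← hds]; exact hy)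
      simpa using this
    have hruns : runsOf (x :: xs) = (x, (n : Int) + 1) :: runsOf ds := by
      rw [runsOf]
    have hA := foldA_eq xs [x] [] x 1 0
    have hcore : pvCore x 1 0 xs
        = (List.replicate n x ++ (pvCore x (1 + (n : Int)) (0 + (n : Int)) ds).1,
           (pvCore x (1 + (n : Int)) (0 + (n : Int)) ds).2) := by
      conv_lhs => rw [hxs]
      exact core_replicate x ds n 1 0
    have hrec := core_runs ds x (1 + (n : Int)) (0 + (n : Int)) hdhead
    show ((xs.foldl pvStepA ([x], [], x, 1, 0)).1, (xs.foldl pvStepA ([x], [], x, 1, 0)).2.1)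
        = remove_stuff_bits_alt (x :: xs)
    rw [hA]
    unfold remove_stuff_bits_alt
    rw [hruns]
    show ([x] ++ (pvCore x 1 0 xs).1, [] ++ (pvCore x 1 0 xs).2)
        = (((runsOf ds).foldl pvStepB
              (List.replicate ((n : Int) + 1).toNat x, [], (n : Int) + 1, (n : Int) + 1)).1,
           ((runsOf ds).foldl pvStepB
              (List.replicate ((n : Int) + 1).toNat x, [], (n : Int) + 1, (n : Int) + 1)).2.1)
    have hB := foldB_append (runsOf ds) (List.replicate ((n : Int) + 1).toNat x) []
      ((n : Int) + 1) ((n : Int) + 1)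
    rw [hB]
    have e1 : 0 + (n : Int) + 1 = (n : Int) + 1 := by ring
    have e2 : 1 + (n : Int) = (n : Int) + 1 := by ring
    have ht : ((n : Int) + 1).toNat = n + 1 := by simp
    rw [e2] at hcore
    rw [e1, e2] at hrec
    simp only [Prod.mk.injEq]
    constructor
    · rw [hcore, hrec, ht]
      simp [List.replicate_succ]
    · rw [hcore, hrec]
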